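-- pv_equiv track=rewrite | github.com/mynlp/ccg2lambda | scripts/linguistic_tools.py | get_wordnet_cascade
-- ===== SOURCE A (Python) =====
-- def get_wordnet_cascade(ling_relations):
--   """
--   Receives a list of linguistic relations (strings),
--   and returns one of those linguistic relations with highest priority:
--   copy > inflection > derivation > synonym > antonym >
--   hypernym > hyponym > sister > cousin > None.
--   """
--   relation = None
--   if 'copy' in ling_relations:
--     relation = 'copy'
--   elif 'inflection' in ling_relations:
--     relation = 'inflection'
--   elif 'derivation' in ling_relations:
--     relation = 'derivation'
--   elif 'synonym' in ling_relations:
--     relation = 'synonym'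
--   elif 'antonym' in ling_relations:
--     relation = 'antonym'
--   elif 'hypernym' in ling_relations:
--     relation = 'hypernym'
--   elif 'similar' in ling_relations:
--     relation = 'similar'
--   elif 'hyponym' in ling_relations:
--     relation = 'hyponym'
--   elif any(lr.startswith('sister') for lr in ling_relations):
--     sister_rels = [lr for lr in ling_relations if lr.startswith('sister')]
--     assert sister_rels
--     relation = sister_rels[0]
--   elif any(lr.startswith('cousin') for lr in ling_relations):
--     cousin_rels = [lr for lr in ling_relations if lr.startswith('cousin')]
--     assert cousin_rels
--     relation = cousin_rels[0]
--   return relation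
-- ===== SOURCE B (Python) =====
-- def get_wordnet_cascade(ling_relations):
--     exact = {'copy': 0, 'inflection': 1, 'derivation': 2, 'synonym': 3,
--              'antonym': 4, 'hypernym': 5, 'similar': 6, 'hyponym': 7}
--     best = None
--     best_rank = 10
--     for lr in ling_relations:
--         rank = exact.get(lr)
--         if rank is None:
--             if lr.startswith('sister'):
--                 rank = 8
--             elif lr.startswith('cousin'):
--                 rank = 9
--             else:
--                 continue
--         if rank < best_rank:
--             best = lr
--             best_rank = rank
--     return best
-- ===== Notes on version B (the rewrite author's own statement) =====
-- stated objective: alternative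
-- what changed: Replaced the 10-branch membership/filter cascade (each branch rescanning the list) by a rank table and one single pass that keeps the element of strictly smallest rank, first element winning ties.
import Mathlib
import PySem

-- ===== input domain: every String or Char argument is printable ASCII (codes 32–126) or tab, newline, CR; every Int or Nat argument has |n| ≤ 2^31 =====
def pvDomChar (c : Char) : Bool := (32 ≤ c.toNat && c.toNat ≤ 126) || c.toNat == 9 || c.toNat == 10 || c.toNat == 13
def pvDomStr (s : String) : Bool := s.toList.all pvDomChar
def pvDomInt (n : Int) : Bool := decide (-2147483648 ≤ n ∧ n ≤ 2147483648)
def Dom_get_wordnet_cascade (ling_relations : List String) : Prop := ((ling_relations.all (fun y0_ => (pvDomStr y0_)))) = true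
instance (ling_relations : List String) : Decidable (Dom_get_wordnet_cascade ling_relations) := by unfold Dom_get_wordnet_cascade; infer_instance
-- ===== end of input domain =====

-- B replaces A's 10-branch membership/filter cascade by a rank table and one pass keeping
-- the element of strictly smallest rank (first wins ties); same return value, alternative structure.

-- ===== PORT A =====
-- 'sister_rels[0]' is ported as pyGet? _ 0; the guarding 'any' makes the list nonempty, so it never yields none.
def get_wordnet_cascade (ling_relations : List String) : Option String :=
  if "copy" ∈ ling_relations then some "copy"
  else if "inflection" ∈ ling_relations then some "inflection"
  else if "derivation" ∈ ling_relations then some "derivation"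
  else if "synonym" ∈ ling_relations then some "synonym"
  else if "antonym" ∈ ling_relations then some "antonym"
  else if "hypernym" ∈ ling_relations then some "hypernym"
  else if "similar" ∈ ling_relations then some "similar"
  else if "hyponym" ∈ ling_relations then some "hyponym"
  else if ling_relations.any (fun lr => PySem.Str.startswith lr "sister") then
    PySem.List.pyGet? (ling_relations.filter (fun lr => PySem.Str.startswith lr "sister")) 0
  else if ling_relations.any (fun lr => PySem.Str.startswith lr "cousin") then
    PySem.List.pyGet? (ling_relations.filter (fun lr => PySem.Str.startswith lr "cousin")) 0
  else none

-- ===== PORT B =====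
def pvExact : PySem.Dict String Nat :=
  PySem.Dict.ofList [("copy", 0), ("inflection", 1), ("derivation", 2), ("synonym", 3),
                     ("antonym", 4), ("hypernym", 5), ("similar", 6), ("hyponym", 7)]

def pvRankOf (lr : String) : Option Nat :=
  match pvExact.get? lr with
  | some r => some r
  | none =>
    if PySem.Str.startswith lr "sister" then some 8
    else if PySem.Str.startswith lr "cousin" then some 9
    else none

def pvStep (st : Option String × Nat) (lr : String) : Option String × Nat :=
  match pvRankOf lr with
  | none => st
  | some r => if r < st.2 then (some lr, r) else st

def get_wordnet_cascade_alt (ling_relations : List String) : Option String :=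
  (ling_relations.foldl pvStep (none, 10)).1

-- ===== PRECONDITION & SPEC =====
def Spec_get_wordnet_cascade (ling_relations : List String) (out : Option String) : Prop := out = get_wordnet_cascade_alt ling_relations
instance (ling_relations : List String) (out : Option String) : Decidable (Spec_get_wordnet_cascade ling_relations out) := by unfold Spec_get_wordnet_cascade; infer_instance

-- ===== CLAIM (what is proved, stated in full; the proofs are below) =====
def Claim_equal_get_wordnet_cascade : Prop := ∀ (ling_relations : List String), Dom_get_wordnet_cascade ling_relations → Spec_get_wordnet_cascade ling_relations (get_wordnet_cascade ling_relations)

-- ===== LEMMAS AND PROOFS =====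

-- proof-side rank function: rk x = the rank pvRankOf assigns, 10 when none
def rk (x : String) : Nat :=
  if "copy" = x then 0 else if "inflection" = x then 1 else if "derivation" = x then 2
  else if "synonym" = x then 3 else if "antonym" = x then 4 else if "hypernym" = x then 5
  else if "similar" = x then 6 else if "hyponym" = x then 7
  else if PySem.Str.startswith x "sister" then 8
  else if PySem.Str.startswith x "cousin" then 9 else 10

theorem pvExact_get? (x : String) : pvExact.get? x =
    if "copy" = x then some 0 else if "inflection" = x then some 1 else if "derivation" = x then some 2
    else if "synonym" = x then some 3 else if "antonym" = x then some 4 else if "hypernym" = x then some 5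
    else if "similar" = x then some 6 else if "hyponym" = x then some 7 else none := by
  have h : pvExact = PySem.Dict.mk [("copy", 0), ("inflection", 1), ("derivation", 2), ("synonym", 3),
      ("antonym", 4), ("hypernym", 5), ("similar", 6), ("hyponym", 7)] := by decide
  rw [h]
  simp [PySem.Dict.get?_mk_cons, beq_iff_eq]
  simp [PySem.Dict.get?]

set_option maxHeartbeats 1000000 in
theorem rankOf_eq (x : String) : pvRankOf x = if rk x < 10 then some (rk x) else none := by
  unfold pvRankOf
  rw [pvExact_get?]
  unfold rk
  split_ifs <;> first | rfl | omega

theorem step_eq (st : Option String × Nat) (x : String) (h : st.2 ≤ 10) :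
    pvStep st x = if rk x < st.2 then (some x, rk x) else st := by
  rw [pvStep, rankOf_eq]
  rcases st with ⟨b, r⟩
  by_cases h10 : rk x < 10 <;> simp [h10] <;> omega

theorem rk_le_ten (x : String) : rk x ≤ 10 := by
  unfold rk; split_ifs
  all_goals omega

-- running the loop when nothing beats the current rank leaves the state alone
theorem loop_no_change (xs : List String) (b : Option String) (r : Nat) (hr : r ≤ 10)
    (h : ∀ x ∈ xs, r ≤ rk x) : xs.foldl pvStep (b, r) = (b, r) := by
  induction xs with
  | nil => rfl
  | cons x xs ih =>
    have hx := h x (by simp)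
    simp only [List.foldl_cons, step_eq (b, r) x hr]
    rw [if_neg (by omega)]
    exact ih (fun y hy => h y (by simp [hy]))

-- when some element beats r and m is the minimal rank present, the loop returns the FIRST element of rank m
theorem loop_min (xs : List String) (b : Option String) (r m : Nat) (hr : r ≤ 10)
    (hmr : m < r) (hex : ∃ x ∈ xs, rk x = m) (hlo : ∀ x ∈ xs, m ≤ rk x) :
    xs.foldl pvStep (b, r) = ((xs.find? (fun x => rk x = m)), m) := by
  induction xs generalizing b r with
  | nil => simp at hex
  | cons x xs ih =>
    simp only [List.foldl_cons]
    rw [step_eq (b, r) x hr]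
    by_cases hx : rk x = m
    · rw [if_pos (by omega), hx]
      rw [loop_no_change xs (some x) m (by omega) (fun y hy => hlo y (by simp [hy]))]
      simp [hx]
    · have hxm : m < rk x := lt_of_le_of_ne (hlo x (by simp)) (fun h => hx h.symm)
      have hex' : ∃ y ∈ xs, rk y = m := by
        rcases hex with ⟨y, hy, hym⟩
        rcases List.mem_cons.mp hy with h | h
        · exact absurd (h ▸ hym) hx
        · exact ⟨y, h, hym⟩
      have hlo' : ∀ y ∈ xs, m ≤ rk y := fun y hy => hlo y (by simp [hy])
      have hfind : List.find? (fun y => decide (rk y = m)) (x :: xs)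
          = List.find? (fun y => decide (rk y = m)) xs := by
        simp [hx]
      by_cases hlt : rk x < r
      · rw [if_pos hlt, ih (some x) (rk x) (by
          have := rk_le_ten x; omega) hxm hex' hlo']
        simp [hfind]
      · rw [if_neg hlt, ih b r hr hmr hex' hlo']
        simp [hfind]


-- classification of rk's possible values
theorem rk_mem (y : String) :
    rk y = 10 ∨ (rk y = 0 ∧ y = "copy") ∨ (rk y = 1 ∧ y = "inflection") ∨ (rk y = 2 ∧ y = "derivation")
    ∨ (rk y = 3 ∧ y = "synonym") ∨ (rk y = 4 ∧ y = "antonym") ∨ (rk y = 5 ∧ y = "hypernym")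
    ∨ (rk y = 6 ∧ y = "similar") ∨ (rk y = 7 ∧ y = "hyponym")
    ∨ (rk y = 8 ∧ PySem.Str.startswith y "sister" = true)
    ∨ (rk y = 9 ∧ PySem.Str.startswith y "cousin" = true) := by
  unfold rk
  split_ifs <;> simp_all

theorem rk_name {y : String} {n : Nat} (name : String) (hn : rk name = n) (hlt : n < 8)
    (h : rk y = n) : y = name := by
  rcases rk_mem y with hc | ⟨h0, rfl⟩ | ⟨h0, rfl⟩ | ⟨h0, rfl⟩ | ⟨h0, rfl⟩ | ⟨h0, rfl⟩ | ⟨h0, rfl⟩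
    | ⟨h0, rfl⟩ | ⟨h0, rfl⟩ | ⟨h0, _⟩ | ⟨h0, _⟩ <;>
    rcases rk_mem name with hc' | ⟨h1, rfl⟩ | ⟨h1, rfl⟩ | ⟨h1, rfl⟩ | ⟨h1, rfl⟩ | ⟨h1, rfl⟩
      | ⟨h1, rfl⟩ | ⟨h1, rfl⟩ | ⟨h1, rfl⟩ | ⟨h1, _⟩ | ⟨h1, _⟩ <;>
    first | rfl | omega

theorem find?_of_unique (xs : List String) (p : String → Bool) (a : String)
    (ha : p a = true) (hu : ∀ x, p x = true → x = a) (hmem : a ∈ xs) :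
    xs.find? p = some a := by
  induction xs with
  | nil => simp at hmem
  | cons x xs ih =>
    by_cases hx : p x = true
    · rw [List.find?_cons_of_pos hx, hu x hx]
    · rw [List.find?_cons_of_neg hx]
      rcases List.mem_cons.mp hmem with rfl | hmem'
      · exact absurd ha hx
      · exact ih hmem'

theorem not_sister_of_cousin (y : String) (h : PySem.Str.startswith y "cousin" = true) :
    PySem.Str.startswith y "sister" = false := by
  by_contra hc
  rw [Bool.not_eq_false] at hc
  rw [PySem.Str.startswith_eq] at h hc
  have h1 := (PySem.Chars.startswith_iff _ _).mp h
  have h2 := (PySem.Chars.startswith_iff _ _).mp hc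
  rw [List.prefix_iff_eq_take] at h1 h2
  have hl : ("cousin".toList : List Char).length = ("sister".toList).length := by decide
  have : ("cousin".toList : List Char) = "sister".toList := by
    rw [h1, h2, hl]
  simp at this

theorem rk_eq_eight (y : String) (h : PySem.Str.startswith y "sister" = true) : rk y = 8 := by
  have c1 : ¬("copy" = y) := by rintro rfl; revert h; decide
  have c2 : ¬("inflection" = y) := by rintro rfl; revert h; decide
  have c3 : ¬("derivation" = y) := by rintro rfl; revert h; decide
  have c4 : ¬("synonym" = y) := by rintro rfl; revert h; decide
  have c5 : ¬("antonym" = y) := by rintro rfl; revert h; decide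
  have c6 : ¬("hypernym" = y) := by rintro rfl; revert h; decide
  have c7 : ¬("similar" = y) := by rintro rfl; revert h; decide
  have c8 : ¬("hyponym" = y) := by rintro rfl; revert h; decide
  unfold rk
  rw [if_neg c1, if_neg c2, if_neg c3, if_neg c4, if_neg c5, if_neg c6, if_neg c7, if_neg c8,
     if_pos h]

theorem rk_eq_nine (y : String) (h : PySem.Str.startswith y "cousin" = true) : rk y = 9 := by
  have c1 : ¬("copy" = y) := by rintro rfl; revert h; decide
  have c2 : ¬("inflection" = y) := by rintro rfl; revert h; decide
  have c3 : ¬("derivation" = y) := by rintro rfl; revert h; decide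
  have c4 : ¬("synonym" = y) := by rintro rfl; revert h; decide
  have c5 : ¬("antonym" = y) := by rintro rfl; revert h; decide
  have c6 : ¬("hypernym" = y) := by rintro rfl; revert h; decide
  have c7 : ¬("similar" = y) := by rintro rfl; revert h; decide
  have c8 : ¬("hyponym" = y) := by rintro rfl; revert h; decide
  have c9 : ¬(PySem.Str.startswith y "sister" = true) := by
    simp only [not_sister_of_cousin y h]
    decide
  unfold rk
  rw [if_neg c1, if_neg c2, if_neg c3, if_neg c4, if_neg c5, if_neg c6, if_neg c7, if_neg c8,
     if_neg c9, if_pos h]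

-- the result of the single pass when the minimal rank m ≤ 7 is achieved by the exact name `name`
theorem alt_of_name (xs : List String) (name : String) (m : Nat) (hname : rk name = m)
    (hm : m < 8) (hmem : name ∈ xs) (hlo : ∀ y ∈ xs, m ≤ rk y) :
    get_wordnet_cascade_alt xs = some name := by
  unfold get_wordnet_cascade_alt
  rw [loop_min xs none 10 m (by omega) (by omega) ⟨name, hmem, hname⟩ hlo]
  simp only
  exact find?_of_unique xs _ name (by simp [hname])
    (fun y hy => rk_name name hname hm (by simpa using hy)) hmem

theorem get_wordnet_cascade_spec : Claim_equal_get_wordnet_cascade := by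
  intro xs _
  unfold Spec_get_wordnet_cascade get_wordnet_cascade
  split_ifs with h1 h2 h3 h4 h5 h6 h7 h8 h9 h10
  · exact (alt_of_name xs "copy" 0 (by decide) (by omega) h1
      (fun y hy => Nat.zero_le _)).symm
  · refine (alt_of_name xs "inflection" 1 (by decide) (by omega) h2 ?_).symm
    intro y hy
    rcases rk_mem y with hc | ⟨h0, rfl⟩ | ⟨h0, _⟩ | ⟨h0, _⟩ | ⟨h0, _⟩ | ⟨h0, _⟩ | ⟨h0, _⟩
      | ⟨h0, _⟩ | ⟨h0, _⟩ | ⟨h0, _⟩ | ⟨h0, _⟩ <;> first | omega | simp_all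
  · refine (alt_of_name xs "derivation" 2 (by decide) (by omega) h3 ?_).symm
    intro y hy
    rcases rk_mem y with hc | ⟨h0, rfl⟩ | ⟨h0, rfl⟩ | ⟨h0, _⟩ | ⟨h0, _⟩ | ⟨h0, _⟩ | ⟨h0, _⟩
      | ⟨h0, _⟩ | ⟨h0, _⟩ | ⟨h0, _⟩ | ⟨h0, _⟩ <;>
      first | omega | simp_all
  · refine (alt_of_name xs "synonym" 3 (by decide) (by omega) h4 ?_).symm
    intro y hy
    rcases rk_mem y with hc | ⟨h0, rfl⟩ | ⟨h0, rfl⟩ | ⟨h0, rfl⟩ | ⟨h0, _⟩ | ⟨h0, _⟩ | ⟨h0, _⟩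
      | ⟨h0, _⟩ | ⟨h0, _⟩ | ⟨h0, _⟩ | ⟨h0, _⟩ <;>
      first | omega | simp_all
  · refine (alt_of_name xs "antonym" 4 (by decide) (by omega) h5 ?_).symm
    intro y hy
    rcases rk_mem y with hc | ⟨h0, rfl⟩ | ⟨h0, rfl⟩ | ⟨h0, rfl⟩ | ⟨h0, rfl⟩ | ⟨h0, _⟩ | ⟨h0, _⟩
      | ⟨h0, _⟩ | ⟨h0, _⟩ | ⟨h0, _⟩ | ⟨h0, _⟩ <;>
      first | omega | simp_all
  · refine (alt_of_name xs "hypernym" 5 (by decide) (by omega) h6 ?_).symm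
    intro y hy
    rcases rk_mem y with hc | ⟨h0, rfl⟩ | ⟨h0, rfl⟩ | ⟨h0, rfl⟩ | ⟨h0, rfl⟩ | ⟨h0, rfl⟩ | ⟨h0, _⟩
      | ⟨h0, _⟩ | ⟨h0, _⟩ | ⟨h0, _⟩ | ⟨h0, _⟩ <;>
      first | omega | simp_all
  · refine (alt_of_name xs "similar" 6 (by decide) (by omega) h7 ?_).symm
    intro y hy
    rcases rk_mem y with hc | ⟨h0, rfl⟩ | ⟨h0, rfl⟩ | ⟨h0, rfl⟩ | ⟨h0, rfl⟩ | ⟨h0, rfl⟩ | ⟨h0, rfl⟩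
      | ⟨h0, _⟩ | ⟨h0, _⟩ | ⟨h0, _⟩ | ⟨h0, _⟩ <;>
      first | omega | simp_all
  · refine (alt_of_name xs "hyponym" 7 (by decide) (by omega) h8 ?_).symm
    intro y hy
    rcases rk_mem y with hc | ⟨h0, rfl⟩ | ⟨h0, rfl⟩ | ⟨h0, rfl⟩ | ⟨h0, rfl⟩ | ⟨h0, rfl⟩ | ⟨h0, rfl⟩
      | ⟨h0, rfl⟩ | ⟨h0, _⟩ | ⟨h0, _⟩ | ⟨h0, _⟩ <;>
      first | omega | simp_all
  · -- sister branch
    obtain ⟨w, hw, hws⟩ := List.any_eq_true.mp h9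
    have hpred : (fun x => decide (rk x = 8)) = (fun lr => PySem.Str.startswith lr "sister") := by
      funext y
      show decide (rk y = 8) = PySem.Str.startswith y "sister"
      rcases hb : PySem.Str.startswith y "sister" with _ | _
      · rcases rk_mem y with hc | ⟨h0, rfl⟩ | ⟨h0, _⟩ | ⟨h0, _⟩ | ⟨h0, _⟩ | ⟨h0, _⟩ | ⟨h0, _⟩
          | ⟨h0, _⟩ | ⟨h0, _⟩ | ⟨h0, hs⟩ | ⟨h0, _⟩ <;> simp_all
      · simp [rk_eq_eight y hb]
    unfold get_wordnet_cascade_alt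
    rw [loop_min xs none 10 8 (by omega) (by omega) ⟨w, hw, rk_eq_eight w hws⟩ ?lo]
    case lo =>
      intro y hy
      rcases rk_mem y with hc | ⟨h0, rfl⟩ | ⟨h0, rfl⟩ | ⟨h0, rfl⟩ | ⟨h0, rfl⟩ | ⟨h0, rfl⟩
        | ⟨h0, rfl⟩ | ⟨h0, rfl⟩ | ⟨h0, rfl⟩ | ⟨h0, _⟩ | ⟨h0, _⟩ <;>
        first | omega | simp_all
    rw [hpred, ← List.head?_filter]
    have hmemf : w ∈ xs.filter (fun lr => PySem.Str.startswith lr "sister") :=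
      List.mem_filter.mpr ⟨hw, hws⟩
    rcases hf : (xs.filter (fun lr => PySem.Str.startswith lr "sister")) with _ | ⟨z, zs⟩
    · rw [hf] at hmemf; simp at hmemf
    · simp [PySem.List.pyGet?, PySem.List.pyIdx?]
  · -- cousin branch
    obtain ⟨w, hw, hws⟩ := List.any_eq_true.mp h10
    have hpred : (fun x => decide (rk x = 9)) = (fun lr => PySem.Str.startswith lr "cousin") := by
      funext y
      show decide (rk y = 9) = PySem.Str.startswith y "cousin"
      rcases hb : PySem.Str.startswith y "cousin" with _ | _
      · rcases rk_mem y with hc | ⟨h0, rfl⟩ | ⟨h0, _⟩ | ⟨h0, _⟩ | ⟨h0, _⟩ | ⟨h0, _⟩ | ⟨h0, _⟩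
          | ⟨h0, _⟩ | ⟨h0, _⟩ | ⟨h0, _⟩ | ⟨h0, hs⟩ <;> simp_all
      · simp [rk_eq_nine y hb]
    unfold get_wordnet_cascade_alt
    rw [loop_min xs none 10 9 (by omega) (by omega) ⟨w, hw, rk_eq_nine w hws⟩ ?lo]
    case lo =>
      intro y hy
      rcases rk_mem y with hc | ⟨h0, rfl⟩ | ⟨h0, rfl⟩ | ⟨h0, rfl⟩ | ⟨h0, rfl⟩ | ⟨h0, rfl⟩
        | ⟨h0, rfl⟩ | ⟨h0, rfl⟩ | ⟨h0, rfl⟩ | ⟨h0, hs⟩ | ⟨h0, _⟩ <;>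
        first | omega | simp_all
    rw [hpred, ← List.head?_filter]
    have hmemf : w ∈ xs.filter (fun lr => PySem.Str.startswith lr "cousin") :=
      List.mem_filter.mpr ⟨hw, hws⟩
    rcases hf : (xs.filter (fun lr => PySem.Str.startswith lr "cousin")) with _ | ⟨z, zs⟩
    · rw [hf] at hmemf; simp at hmemf
    · simp [PySem.List.pyGet?, PySem.List.pyIdx?]
  · -- nothing matched
    unfold get_wordnet_cascade_alt
    rw [loop_no_change xs none 10 (by omega) ?lo]
    case lo =>
      intro y hy
      rcases rk_mem y with hc | ⟨h0, rfl⟩ | ⟨h0, rfl⟩ | ⟨h0, rfl⟩ | ⟨h0, rfl⟩ | ⟨h0, rfl⟩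
        | ⟨h0, rfl⟩ | ⟨h0, rfl⟩ | ⟨h0, rfl⟩ | ⟨h0, hs⟩ | ⟨h0, hs⟩ <;>
        first | omega | simp_all
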